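-- pv_equiv track=rewrite | github.com/LuisAndree/cripto-2024 | cifra de hill/descriptografar.py | gerar_matriz_chave
-- ===== SOURCE A (Python) =====
-- def gerar_matriz_chave(chave, tamanho):
--     chave = chave.lower().replace(" ", "")
--     matriz_chave = []
--     indice = 0
--     for i in range(tamanho):
--         linha = []
--         for j in range(tamanho):
--             if indice < len(chave):
--                 linha.append(ord(chave[indice]) - ord('a'))
--             else:
--                 linha.append(0)
--             indice += 1
--         matriz_chave.append(linha)
--     return matriz_chave
-- ===== SOURCE B (Python) =====
-- def gerar_matriz_chave(chave, tamanho):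
--     s = chave.lower().replace(" ", "")
--     n = max(tamanho, 0)
--     flat = ([ord(c) - ord('a') for c in s] + [0] * (n * n))[:n * n]
--     return [flat[i * tamanho:(i + 1) * tamanho] for i in range(tamanho)]
-- ===== Notes on version B (the rewrite author's own statement) =====
-- stated objective: simpler
-- what changed: Replaces A's index-tracking double loop with a produce-then-reshape decomposition: build the flat list of letter values once, pad/truncate it to tamanho*tamanho, and slice it into rows.
import Mathlib
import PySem

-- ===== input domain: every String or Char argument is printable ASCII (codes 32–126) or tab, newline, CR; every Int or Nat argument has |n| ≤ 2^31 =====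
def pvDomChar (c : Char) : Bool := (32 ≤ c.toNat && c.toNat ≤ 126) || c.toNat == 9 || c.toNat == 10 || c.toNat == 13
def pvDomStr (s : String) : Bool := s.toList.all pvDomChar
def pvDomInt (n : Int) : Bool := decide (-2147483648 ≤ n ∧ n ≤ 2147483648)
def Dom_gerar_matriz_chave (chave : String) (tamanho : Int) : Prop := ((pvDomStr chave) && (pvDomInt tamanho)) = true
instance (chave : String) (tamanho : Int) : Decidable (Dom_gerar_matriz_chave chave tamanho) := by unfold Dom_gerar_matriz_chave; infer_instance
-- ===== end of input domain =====

-- B replaces A's index-tracking double loop by building the flat value list once,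
-- padding/truncating it to tamanho², and reshaping it into rows by slicing (objective: simpler).

-- ===== PORT A =====
def gerar_matriz_chave (chave : String) (tamanho : Int) : List (List Int) :=
  let chave2 := PySem.Str.replace (PySem.Str.lower chave) " " ""
  let st := (PySem.List.pyRange 0 tamanho 1).foldl
    (fun (st : List (List Int) × Int) _ =>
      let inner := (PySem.List.pyRange 0 tamanho 1).foldl
        (fun (li : List Int × Int) _ =>
          let linha := if li.2 < PySem.Str.len chave2 then
              li.1 ++ [((PySem.Str.pyGet? chave2 li.2).map
                          (fun c : Char => (c.toNat : Int) - ('a'.toNat : Int))).getD 0]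
            else li.1 ++ [0]
          (linha, li.2 + 1))
        (([] : List Int), st.2)
      (st.1 ++ [inner.1], inner.2))
    (([] : List (List Int)), (0 : Int))
  st.1

-- ===== PORT B =====
def gerar_matriz_chave_alt (chave : String) (tamanho : Int) : List (List Int) :=
  let s := (PySem.Str.replace (PySem.Str.lower chave) " " "").toList
  let n := max tamanho 0
  let flat := PySem.List.slice
    (s.map (fun c : Char => (c.toNat : Int) - ('a'.toNat : Int)) ++ List.replicate (n * n).toNat 0)
    none (some (n * n))
  (PySem.List.pyRange 0 tamanho 1).map
    (fun i => PySem.List.slice flat (some (i * tamanho)) (some ((i + 1) * tamanho)))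

-- ===== PRECONDITION & SPEC =====
def Spec_gerar_matriz_chave (chave : String) (tamanho : Int) (out : List (List Int)) : Prop := out = gerar_matriz_chave_alt chave tamanho
instance (chave : String) (tamanho : Int) (out : List (List Int)) : Decidable (Spec_gerar_matriz_chave chave tamanho out) := by unfold Spec_gerar_matriz_chave; infer_instance

-- ===== CLAIM (what is proved, stated in full; the proofs are below) =====
def Claim_equal_gerar_matriz_chave : Prop := ∀ (chave : String) (tamanho : Int), Dom_gerar_matriz_chave chave tamanho → Spec_gerar_matriz_chave chave tamanho (gerar_matriz_chave chave tamanho)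

-- ===== LEMMAS AND PROOFS =====

/-- The per-cell value A fills in at flat position `k`. -/
def pvCell (cs : List Char) (k : Int) : Int :=
  if k < (cs.length : Int) then
    ((PySem.List.pyGet? cs k).map (fun c : Char => (c.toNat : Int) - ('a'.toNat : Int))).getD 0
  else 0

lemma pv_inner_fold (cs : List Char) (r : List Int) (l : List Int) (k : Int) :
    r.foldl (fun (li : List Int × Int) _ => (li.1 ++ [pvCell cs li.2], li.2 + 1)) (l, k)
      = (l ++ (List.range r.length).map (fun j : Nat => pvCell cs (k + (j:Int))), k + r.length) := by
  induction r generalizing l k with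
  | nil => simp
  | cons x r ih =>
      rw [List.foldl_cons, ih, List.length_cons, List.range_succ_eq_map]
      simp only [List.map_cons, List.map_map, Prod.mk.injEq, List.append_assoc,
        List.singleton_append]
      refine ⟨?_, by push_cast; ring⟩
      congr 1
      congr 1
      · norm_num
      · apply List.map_congr_left
        intro j _
        simp only [Function.comp_apply]
        congr 1
        push_cast; ring

lemma pv_outer_fold (row : Int → List Int) (t : Int) (r : List Int)
    (m : List (List Int)) (k : Int) :
    r.foldl (fun (st : List (List Int) × Int) _ => (st.1 ++ [row st.2], st.2 + t)) (m, k)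
      = (m ++ (List.range r.length).map (fun i : Nat => row (k + (i:Int) * t)), k + r.length * t) := by
  induction r generalizing m k with
  | nil => simp
  | cons x r ih =>
      rw [List.foldl_cons, ih, List.length_cons, List.range_succ_eq_map]
      simp only [List.map_cons, List.map_map, Prod.mk.injEq, List.append_assoc,
        List.singleton_append]
      refine ⟨?_, by push_cast; ring⟩
      congr 1
      congr 1
      · norm_num
      · apply List.map_congr_left
        intro j _
        simp only [Function.comp_apply]
        congr 1
        push_cast; ring

lemma pv_chunk (cs : List Char) (t a : Nat) (h : a + t ≤ t * t) :
    ((((cs.map (fun c : Char => (c.toNat : Int) - ('a'.toNat : Int)))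
        ++ List.replicate (t * t) 0).take (t * t)).drop a).take t
      = (List.range t).map (fun j : Nat => pvCell cs ((a : Int) + (j : Int))) := by
  apply List.ext_getElem
  · simp; omega
  · intro j hj1 hj2
    simp only [List.length_take, List.length_drop] at hj1
    have hj : j < t := by simp at hj2; omega
    have hk : a + j < t * t := by omega
    have hlen : ((cs.map (fun c : Char => (c.toNat : Int) - ('a'.toNat : Int)))
        ++ List.replicate (t * t) 0).length = cs.length + t * t := by simp
    simp only [List.getElem_take, List.getElem_drop, List.getElem_map]
    simp only [List.getElem_range]
    by_cases hc : a + j < cs.length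
    · rw [List.getElem_append_left (by simpa using hc)]
      simp only [List.getElem_map, pvCell]
      have : ((a : Int) + (j : Int)) = ((a + j : Nat) : Int) := by push_cast; ring
      rw [this]
      rw [if_pos (by exact_mod_cast hc)]
      rw [PySem.List.pyGet?_natCast]
      simp [List.getElem?_eq_getElem hc]
    · rw [List.getElem_append_right (by simpa using hc)]
      simp only [List.getElem_replicate, pvCell]
      have : ((a : Int) + (j : Int)) = ((a + j : Nat) : Int) := by push_cast; ring
      rw [this, if_neg (by exact_mod_cast hc)]

-- ===== VERDICT (by name: the statement is the Claim_ definition above) =====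
set_option maxHeartbeats 1000000 in
theorem gerar_matriz_chave_spec : Claim_equal_gerar_matriz_chave := by
  intro chave tamanho _
  unfold Spec_gerar_matriz_chave gerar_matriz_chave gerar_matriz_chave_alt
  by_cases hpos : tamanho ≤ 0
  · rw [PySem.List.pyRange_one_eq_nil hpos]
    simp
  · rw [not_le] at hpos
    set chave2 := PySem.Str.replace (PySem.Str.lower chave) " " "" with hchave2
    set cs := chave2.toList with hcs
    obtain ⟨t, ht⟩ : ∃ t : Nat, tamanho = (t : Int) :=
      ⟨tamanho.toNat, (Int.toNat_of_nonneg (le_of_lt hpos)).symm⟩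
    have htpos : 0 < t := by omega
    -- rewrite A's inner step into pvCell form
    have hstep : (fun (li : List Int × Int) (_ : Int) =>
        (if li.2 < PySem.Str.len chave2 then
            li.1 ++ [((PySem.Str.pyGet? chave2 li.2).map
                        (fun c : Char => (c.toNat : Int) - ('a'.toNat : Int))).getD 0]
          else li.1 ++ [0], li.2 + 1))
        = (fun (li : List Int × Int) (_ : Int) => (li.1 ++ [pvCell cs li.2], li.2 + 1)) := by
      funext li _
      simp only [pvCell, PySem.Str.len_eq, PySem.Str.pyGet?_eq, PySem.Chars.pyGet?, ← hcs, apply_ite (fun v => li.1 ++ [v])]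
    have hlenr : (PySem.List.pyRange 0 tamanho 1).length = t := by
      rw [PySem.List.length_pyRange_one]; omega
    -- rewrite A's outer step into row form
    have hrow : (fun (st : List (List Int) × Int) (_ : Int) =>
        (st.1 ++ [((PySem.List.pyRange 0 tamanho 1).foldl
            (fun (li : List Int × Int) _ =>
              (if li.2 < PySem.Str.len chave2 then
                  li.1 ++ [((PySem.Str.pyGet? chave2 li.2).map
                              (fun c : Char => (c.toNat : Int) - ('a'.toNat : Int))).getD 0]
                else li.1 ++ [0], li.2 + 1))
            (([] : List Int), st.2)).1],
         ((PySem.List.pyRange 0 tamanho 1).foldl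
            (fun (li : List Int × Int) _ =>
              (if li.2 < PySem.Str.len chave2 then
                  li.1 ++ [((PySem.Str.pyGet? chave2 li.2).map
                              (fun c : Char => (c.toNat : Int) - ('a'.toNat : Int))).getD 0]
                else li.1 ++ [0], li.2 + 1))
            (([] : List Int), st.2)).2))
        = (fun (st : List (List Int) × Int) (_ : Int) =>
            (st.1 ++ [(List.range t).map (fun j : Nat => pvCell cs (st.2 + (j:Int)))], st.2 + (t : Int))) := by
      funext st _
      rw [hstep, pv_inner_fold, hlenr]
      simp
    simp only [hrow]
    rw [pv_outer_fold (fun k => (List.range t).map (fun j : Nat => pvCell cs (k + (j:Int)))) (t : Int)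
          (PySem.List.pyRange 0 tamanho 1) [] 0, hlenr]
    -- B side
    have hmax : max tamanho 0 = (t : Int) := by omega
    have hnn : (max tamanho 0 * max tamanho 0).toNat = t * t := by
      rw [hmax, ← Nat.cast_mul, Int.toNat_natCast]
    have hmm : max tamanho 0 * max tamanho 0 = ((t * t : Nat) : Int) := by
      rw [hmax, ← Nat.cast_mul]
    have hflat : PySem.List.slice
        ((cs.map (fun c : Char => (c.toNat : Int) - ('a'.toNat : Int)))
          ++ List.replicate ((max tamanho 0 * max tamanho 0).toNat) 0)
        none (some (max tamanho 0 * max tamanho 0))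
        = ((cs.map (fun c : Char => (c.toNat : Int) - ('a'.toNat : Int)))
            ++ List.replicate (t * t) 0).take (t * t) := by
      rw [hnn, hmm, PySem.List.slice_to_natCast]
    rw [hflat]
    rw [ht, PySem.List.pyRange_one]
    simp only [List.map_map, List.nil_append]
    apply List.map_congr_left
    intro i hi
    have hi' : i < t := List.mem_range.mp hi
    simp only [Function.comp]
    have ha : ((0 : Int) + (i : Int)) * (t : Int) = ((i * t : Nat) : Int) := by push_cast; ring
    have hb : ((0 : Int) + (i : Int) + 1) * (t : Int) = ((i * t : Nat) : Int) + ((t : Nat) : Int) := by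
      push_cast; ring
    rw [ha, hb, PySem.List.slice_natCast_add]
    rw [pv_chunk cs t (i * t) (by nlinarith)]
    apply List.map_congr_left
    intro j hj
    apply congrArg (pvCell cs)
    push_cast; ring
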